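-- pv_equiv track=rewrite | github.com/JumpyDumpty/people-at-the-party | party_people.py | party_people
-- ===== SOURCE A (Python) =====
-- def party_people(lst):
--     ppl = len(lst)
--     if ppl != 0:
--         b = biggest(lst)
--         if ppl < b:
--             return party_people(deletion(lst, b))
--         else:
--             return ppl
--     else:
--         return 0
--
-- def biggest(a):
--     largest = a[0]
--     for i in a[:]:
--         if i > largest:
--             largest = i
--     return largest
--
-- def deletion(lst, target):
--     for e in lst:
--         if e == target:
--             lst.remove(e)
--     return lst
-- ===== SOURCE B (Python) =====
-- def party_people(lst):
--     # Sort once (descending), then peel off the group of largest values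
--     # while the remaining count is below the current maximum.
--     s = sorted(lst, reverse=True)
--     n = len(s)
--     i = 0
--     while i < n and n - i < s[i]:
--         v = s[i]
--         while i < n and s[i] == v:
--             i += 1
--     return n - i
-- ===== Notes on version B (the rewrite author's own statement) =====
-- stated objective: faster
-- what changed: A repeatedly rescans the list (max + mutating multi-pass deletion + recursion, quadratic); B sorts once in descending order and peels off equal-value groups from the front until the remaining count reaches the current maximum.
import Mathlib
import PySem

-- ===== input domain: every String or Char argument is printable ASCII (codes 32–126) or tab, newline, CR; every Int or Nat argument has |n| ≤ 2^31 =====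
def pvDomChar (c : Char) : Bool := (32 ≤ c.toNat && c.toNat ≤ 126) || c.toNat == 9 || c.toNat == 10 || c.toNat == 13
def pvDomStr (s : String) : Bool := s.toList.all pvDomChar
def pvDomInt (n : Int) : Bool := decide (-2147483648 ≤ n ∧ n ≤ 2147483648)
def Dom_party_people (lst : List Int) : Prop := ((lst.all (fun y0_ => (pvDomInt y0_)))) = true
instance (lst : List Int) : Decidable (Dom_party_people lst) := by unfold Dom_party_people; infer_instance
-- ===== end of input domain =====

-- B sorts once (descending) and peels equal-value groups instead of A's repeated max+delete passes.
-- Note: Python A mutates its argument in place (deletion removes elements); the equivalence proved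
-- here is about the return value only.


-- ===== PORT A =====
-- biggest(a): largest = a[0]; for i in a[:]: if i > largest: largest = i
-- (only called on nonempty lists; headD 0 stands for a[0] there)
def biggest (a : List Int) : Int :=
  a.foldl (fun largest i => if i > largest then i else largest) (a.headD 0)

-- 'for e in lst: if e == target: lst.remove(e)' — Python's for keeps an internal
-- index into the mutating list; lst.remove(e) with e == target erases the FIRST
-- occurrence of target. Ported index-for-index.
theorem pv_deletionGo_dec (target : Int) (lst : List Int) (i : Nat) (h : i < lst.length) :
    (if lst[i] == target then lst.erase target else lst).length - (i + 1) < lst.length - i := by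
  split
  · have := List.length_erase_le (l := lst) (a := target); omega
  · omega

def deletionGo (target : Int) (lst : List Int) (i : Nat) : List Int :=
  if h : i < lst.length then
    deletionGo target (if lst[i] == target then lst.erase target else lst) (i+1)
  else lst
termination_by lst.length - i
decreasing_by exact pv_deletionGo_dec target lst i h

def deletion (lst : List Int) (target : Int) : List Int := deletionGo target lst 0

theorem deletionGo_length_le (target : Int) (lst : List Int) (i : Nat) :
    (deletionGo target lst i).length ≤ lst.length := by
  fun_induction deletionGo target lst i with
  | case1 lst i h ih =>
    refine le_trans ih ?_
    split
    · exact List.length_erase_le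
    · exact le_rfl
  | case2 => exact le_rfl

theorem deletionGo_length_lt (target : Int) (lst : List Int) (i : Nat)
    (hx : ∃ j, i ≤ j ∧ lst[j]? = some target) :
    (deletionGo target lst i).length < lst.length := by
  fun_induction deletionGo target lst i with
  | case1 lst i h ih =>
    by_cases he : lst[i] == target
    · have hm : target ∈ lst := by
        have h1 : lst[i] = target := by simpa using he
        exact h1 ▸ lst.getElem_mem h
      have h1 := deletionGo_length_le target (lst.erase target) (i+1)
      have h2 : (lst.erase target).length = lst.length - 1 := List.length_erase_of_mem hm
      simp only [he, if_true] at *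
      omega
    · simp only [he, Bool.false_eq_true, if_false] at ih ⊢
      obtain ⟨j, hij, hjt⟩ := hx
      have hji : j ≠ i := by
        intro hc; subst hc
        rw [List.getElem?_eq_getElem h] at hjt
        simp at hjt
        simp [hjt] at he
      exact ih ⟨j, by omega, hjt⟩
  | case2 lst i h =>
    obtain ⟨j, hij, hj⟩ := hx
    obtain ⟨hlt, -⟩ := List.getElem?_eq_some_iff.mp hj
    omega

theorem foldl_big_mem (l : List Int) : ∀ acc : Int,
    l.foldl (fun largest i => if i > largest then i else largest) acc = acc ∨
    l.foldl (fun largest i => if i > largest then i else largest) acc ∈ l := by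
  induction l with
  | nil => intro acc; simp
  | cons x xs ih =>
    intro acc
    rw [List.foldl_cons]
    rcases ih (if x > acc then x else acc) with h | h
    · rw [h]
      split
      · right; exact List.mem_cons_self ..
      · left; rfl
    · right; exact List.mem_cons_of_mem _ h

theorem biggest_mem (lst : List Int) (h : lst ≠ []) : biggest lst ∈ lst := by
  obtain ⟨x, xs, rfl⟩ := List.exists_cons_of_ne_nil h
  unfold biggest
  simp only [List.headD_cons]
  rcases foldl_big_mem (x :: xs) x with h1 | h1
  · rw [h1]; exact List.mem_cons_self ..
  · exact h1

theorem pv_party_people_dec (lst : List Int) (h : lst ≠ []) :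
    (deletion lst (biggest lst)).length < lst.length := by
  have hb : biggest lst ∈ lst := biggest_mem lst h
  obtain ⟨j, hj, hget⟩ := List.getElem_of_mem hb
  exact deletionGo_length_lt _ lst 0 ⟨j, Nat.zero_le _, by rw [List.getElem?_eq_getElem hj, hget]⟩

def party_people (lst : List Int) : Int :=
  let ppl := lst.length
  if ppl ≠ 0 then
    let b := biggest lst
    if (ppl : Int) < b then
      party_people (deletion lst b)
    else (ppl : Int)
  else 0
termination_by lst.length
decreasing_by exact pv_party_people_dec lst (by intro hc; simp only [ppl, hc, List.length_nil] at *; omega)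

-- ===== PORT B =====
-- inner while: advance past the group of values equal to v
def dropGroup (v : Int) : List Int → List Int
  | [] => []
  | x :: xs => if x == v then dropGroup v xs else x :: xs

theorem dropGroup_length_le (v : Int) (l : List Int) : (dropGroup v l).length ≤ l.length := by
  induction l with
  | nil => simp [dropGroup]
  | cons x xs ih =>
    simp only [dropGroup]
    split
    · simp; omega
    · simp

-- outer while over the descending-sorted list; n - i = length of the remaining suffix
theorem pv_peelGo_dec (v : Int) (rest : List Int) :
    (dropGroup v rest).length < (v :: rest).length :=
  Nat.lt_succ_of_le (dropGroup_length_le v rest)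

def peelGo : List Int → Int
  | [] => 0
  | v :: rest =>
    if ((rest.length : Int) + 1) < v then peelGo (dropGroup v rest)
    else (rest.length : Int) + 1
termination_by s => s.length
decreasing_by exact pv_peelGo_dec v rest

def party_people_alt (lst : List Int) : Int :=
  peelGo (PySem.List.sorted lst (fun x => x) true)

-- ===== PRECONDITION & SPEC =====
def Spec_party_people (lst : List Int) (out : Int) : Prop := out = party_people_alt lst
instance (lst : List Int) (out : Int) : Decidable (Spec_party_people lst out) := by unfold Spec_party_people; infer_instance

-- ===== CLAIM (what is proved, stated in full; the proofs are below) =====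
def Claim_equal_party_people : Prop := ∀ (lst : List Int), Dom_party_people lst → Spec_party_people lst (party_people lst)

-- ===== LEMMAS AND PROOFS =====

theorem foldl_big_ge_acc (l : List Int) : ∀ acc : Int,
    acc ≤ l.foldl (fun largest i => if i > largest then i else largest) acc := by
  induction l with
  | nil => intro acc; simp
  | cons x xs ih =>
    intro acc
    rw [List.foldl_cons]
    exact le_trans (by split <;> omega) (ih _)

theorem foldl_big_ge_mem (l : List Int) : ∀ acc : Int, ∀ x ∈ l,
    x ≤ l.foldl (fun largest i => if i > largest then i else largest) acc := by
  induction l with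
  | nil => intro acc x hx; simp at hx
  | cons y ys ih =>
    intro acc x hx
    rw [List.foldl_cons]
    rcases List.mem_cons.mp hx with rfl | hx
    · exact le_trans (by split <;> omega) (foldl_big_ge_acc ys _)
    · exact ih _ x hx

theorem biggest_ge (lst : List Int) : ∀ x ∈ lst, x ≤ biggest lst := by
  cases lst with
  | nil => intro x hx; simp at hx
  | cons y ys =>
    intro x hx
    unfold biggest
    simp only [List.headD_cons]
    exact foldl_big_ge_mem (y :: ys) y x hx


-- reference recursion both programs satisfy: drop ALL copies of the max while count < max
def pvRef (lst : List Int) : Int :=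
  if lst = [] then 0
  else
    let b := biggest lst
    if (lst.length : Int) < b then pvRef (lst.filter (fun x => x != b))
    else (lst.length : Int)
termination_by lst.length
decreasing_by
  rename_i hne _
  have h1 : (lst.filter (fun x => x != biggest lst)).length < lst.length :=
    List.length_filter_lt_length_iff_exists.mpr ⟨biggest lst, biggest_mem lst hne, by simp⟩
  simpa using h1

theorem biggest_eq (l : List Int) (b : Int) (hb : b ∈ l) (hub : ∀ x ∈ l, x ≤ b) :
    biggest l = b :=
  le_antisymm (hub _ (biggest_mem l (List.ne_nil_of_mem hb))) (biggest_ge l b hb)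

theorem erase_filter_ne (b : Int) (l : List Int) :
    (l.erase b).filter (fun x => x != b) = l.filter (fun x => x != b) := by
  induction l with
  | nil => simp
  | cons x xs ih =>
    by_cases hx : x = b
    · subst hx; simp [List.erase_cons_head]
    · rw [List.erase_cons_tail (by simpa using hx)]
      simp [hx, ih]

theorem deletionGo_filter (target : Int) (lst : List Int) (i : Nat) :
    (deletionGo target lst i).filter (fun x => x != target) =
      lst.filter (fun x => x != target) := by
  fun_induction deletionGo target lst i with
  | case1 lst i h ih =>
    simp only [dite_eq_ite] at ih ⊢
    rw [ih]
    split
    · exact erase_filter_ne target lst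
    · rfl
  | case2 lst i h => rfl

theorem deletionGo_subset (target : Int) (lst : List Int) (i : Nat) (x : Int)
    (hx : x ∈ deletionGo target lst i) : x ∈ lst := by
  fun_induction deletionGo target lst i with
  | case1 lst i h ih =>
    have h1 := ih hx
    split at h1
    · exact List.mem_of_mem_erase h1
    · exact h1
  | case2 lst i h => exact hx

theorem A_eq_ref (lst : List Int) : party_people lst = pvRef lst := by
  generalize hn : lst.length = n
  induction n using Nat.strong_induction_on generalizing lst with
  | _ n ih =>
  rcases eq_or_ne lst [] with rfl | hne
  · rw [party_people.eq_def, pvRef.eq_def]; simp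
  · have hlen0 : lst.length ≠ 0 := fun hc => hne (List.length_eq_zero_iff.mp hc)
    by_cases hlt : (lst.length : Int) < biggest lst
    · -- recursive case
      have hb : biggest lst ∈ lst := biggest_mem lst hne
      obtain ⟨j, hj, hget⟩ := List.getElem_of_mem hb
      have hDlt : (deletion lst (biggest lst)).length < lst.length :=
        deletionGo_length_lt _ lst 0 ⟨j, Nat.zero_le _, by rw [List.getElem?_eq_getElem hj, hget]⟩
      have hDfil : (deletion lst (biggest lst)).filter (fun x => x != biggest lst) =
          lst.filter (fun x => x != biggest lst) := deletionGo_filter _ lst 0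
      have hDsub : ∀ x ∈ deletion lst (biggest lst), x ∈ lst :=
        fun x hx => deletionGo_subset _ lst 0 x hx
      have step1 : party_people lst = party_people (deletion lst (biggest lst)) := by
        rw [party_people.eq_def]
        simp [hlen0, hlt]
      have step2 : party_people (deletion lst (biggest lst)) = pvRef (deletion lst (biggest lst)) :=
        ih _ (hn ▸ hDlt) _ rfl
      have step3 : pvRef (deletion lst (biggest lst)) = pvRef (lst.filter (fun x => x != biggest lst)) := by
        by_cases hbD : biggest lst ∈ deletion lst (biggest lst)
        · have hDne : deletion lst (biggest lst) ≠ [] := List.ne_nil_of_mem hbD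
          have hDmax : biggest (deletion lst (biggest lst)) = biggest lst :=
            biggest_eq _ _ hbD (fun x hx => biggest_ge lst x (hDsub x hx))
          have hDlt2 : ((deletion lst (biggest lst)).length : Int) < biggest lst := by
            have := hDlt; omega
          rw [pvRef.eq_def]
          simp only [hDne, if_false, hDmax, hDlt2, if_true]
          rw [hDfil]
        · have hfil2 : (deletion lst (biggest lst)).filter (fun x => x != biggest lst) =
              deletion lst (biggest lst) :=
            List.filter_eq_self.mpr (fun a ha => by
              simp only [bne_iff_ne, ne_eq]
              intro hc; exact hbD (hc ▸ ha))
          rw [← hfil2, hDfil]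
      have step4 : pvRef lst = pvRef (lst.filter (fun x => x != biggest lst)) := by
        rw [pvRef.eq_def]
        simp [hne, hlt]
      rw [step1, step2, step3, ← step4]
    · rw [party_people.eq_def, pvRef.eq_def]
      simp [hlen0, hne, hlt]

theorem dropGroup_sorted_filter (v : Int) (rest : List Int)
    (hpair : rest.Pairwise (fun a b => b ≤ a)) (hub : ∀ x ∈ rest, x ≤ v) :
    dropGroup v rest = rest.filter (fun x => x != v) := by
  induction rest with
  | nil => simp [dropGroup]
  | cons x xs ih =>
    by_cases hx : x = v
    · subst hx
      simp only [dropGroup, BEq.rfl, if_true, List.filter_cons, bne_self_eq_false]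
      exact ih (List.pairwise_cons.mp hpair).2 (fun y hy => hub y (List.mem_cons_of_mem _ hy))
    · have hxv : x < v := lt_of_le_of_ne (hub x (List.mem_cons_self ..)) hx
      have hxs : ∀ y ∈ xs, y ≠ v := fun y hy hc => by
        have := (List.pairwise_cons.mp hpair).1 y hy
        omega
      simp only [dropGroup, List.filter_cons]
      rw [if_neg (by simpa using hx), if_pos (by simpa using hx)]
      rw [List.filter_eq_self.mpr (fun a ha => by simpa using hxs a ha)]

theorem B_eq_ref (lst : List Int) : party_people_alt lst = pvRef lst := by
  generalize hn : lst.length = n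
  induction n using Nat.strong_induction_on generalizing lst with
  | _ n ih =>
  rcases eq_or_ne lst [] with rfl | hne
  · rw [pvRef.eq_def]
    simp only [if_true]
    unfold party_people_alt
    rw [(PySem.List.sorted_eq_nil_iff [] (fun x => x) true).mpr rfl]
    simp [peelGo]
  · have hperm : (PySem.List.sorted lst (fun x => x) true).Perm lst :=
      PySem.List.sorted_perm lst (fun x => x) true
    have hsne : PySem.List.sorted lst (fun x => x) true ≠ [] := by
      intro hc; exact hne ((PySem.List.sorted_eq_nil_iff lst (fun x => x) true).mp hc)
    obtain ⟨v, rest, hs⟩ := List.exists_cons_of_ne_nil hsne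
    have hpair : (v :: rest).Pairwise (fun a b : Int => b ≤ a) := by
      have := PySem.List.sorted_pairwise_rev lst (fun x => x)
      rwa [hs] at this
    have hub : ∀ y ∈ lst, y ≤ v := PySem.List.key_head_sorted_rev_ge lst (fun x => x) hs
    have hvmem : v ∈ lst := hperm.mem_iff.mp (hs ▸ List.mem_cons_self ..)
    have hbv : biggest lst = v := biggest_eq lst v hvmem hub
    have hslen : rest.length + 1 = lst.length := by
      have := hperm.length_eq
      rw [hs] at this
      simpa using this
    unfold party_people_alt
    rw [hs, peelGo]
    by_cases hlt : (lst.length : Int) < v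
    · rw [if_pos (by omega)]
      have hdg : dropGroup v rest = rest.filter (fun x => x != v) :=
        dropGroup_sorted_filter v rest (List.pairwise_cons.mp hpair).2
          (fun x hx => (List.pairwise_cons.mp hpair).1 x hx)
      have hfil : rest.filter (fun x => x != v) =
          PySem.List.sorted (lst.filter (fun x => x != v)) (fun x => x) true := by
        refine List.Perm.eq_of_pairwise (le := fun a b : Int => b ≤ a)
          (fun a b _ _ h1 h2 => le_antisymm h2 h1) ?_ ?_ ?_
        · exact List.Pairwise.filter _ (List.pairwise_cons.mp hpair).2
        · exact PySem.List.sorted_pairwise_rev _ _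
        · refine List.Perm.trans ?_ (PySem.List.sorted_perm _ _ _).symm
          have h2 := hperm.filter (fun x => x != v)
          rw [hs] at h2
          simpa using h2
      have hflen : (lst.filter (fun x => x != v)).length < lst.length :=
        List.length_filter_lt_length_iff_exists.mpr ⟨v, hvmem, by simp⟩
      rw [hdg, hfil]
      have := ih _ (hn ▸ hflen) (lst.filter (fun x => x != v)) rfl
      unfold party_people_alt at this
      rw [this]
      conv_rhs => rw [pvRef.eq_def]
      simp [hne, hbv, hlt]
    · rw [if_neg (by omega)]
      rw [pvRef.eq_def]
      simp [hne, hbv, hlt]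
      omega

-- ===== VERDICT (by name: the statement is the Claim_ definition above) =====
theorem party_people_spec : Claim_equal_party_people := by
  intro lst _
  unfold Spec_party_people
  rw [A_eq_ref, B_eq_ref]
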